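-- pv_equiv track=rewrite | github.com/peppelongo96/python-exercises-by-course | unical/anno15_16/fondInformatica/(Array_funzioni (Lupia)).py | costruisci_lista
-- ===== SOURCE A (Python) =====
-- def costruisci_lista(v1,v2):
--     #costruisce una lista che nelle posizioni pari contiene la sommatoria degli elementi del primo
--     #vettore a partire da quella posizione, nelle posizioni dispari contiene la produttoria del secondo
--     #vettore a partire da quella posizione. L'ultima posizione sarà sempre 0
--     v3=[]
--     for i in range(len(v1)):
--         if i%2==0:
--             v3.append(somma_celle(v1,i+1))
--         else:
--             if i==len(v1)-1:
--                 v3.append(0)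
--             else:
--                 v3.append(prodotto_celle(v2,i+1))
--     return v3
--
-- def somma_celle(v,pos):
--     #restituisce la somma degli elementi del vettore da una posizione data fino al'ultima
--     somma=0
--     for i in range(pos,len(v)):
--         somma+=v[i]
--     return somma
--
-- def prodotto_celle(v,pos):
--     #restituisce il prodotto degli elementi del vettore da una posizione data fino al'ultima
--     prodotto=1
--     for i in range(pos,len(v)):
--         prodotto*=v[i]
--     return prodotto
-- ===== SOURCE B (Python) =====
-- def costruisci_lista(v1, v2):
--     # One backward pass: suffix products of v2 precomputed, suffix sum of v1 carried.
--     n, m = len(v1), len(v2)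
--     prods = [1] * (m + 1)
--     for j in range(m - 1, -1, -1):
--         prods[j] = v2[j] * prods[j + 1]
--     out = [0] * n
--     s = 0
--     for i in range(n - 1, -1, -1):
--         if i % 2 == 0:
--             out[i] = s
--         elif i != n - 1:
--             out[i] = prods[min(i + 1, m)]
--         s += v1[i]
--     return out
-- ===== Notes on version B (the rewrite author's own statement) =====
-- stated objective: faster
-- what changed: Replaced the per-index recomputation of suffix sums/products (a fresh inner loop for every position) by a single backward pass that precomputes the suffix-product array of v2 and carries a running suffix sum of v1.
import Mathlib
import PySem

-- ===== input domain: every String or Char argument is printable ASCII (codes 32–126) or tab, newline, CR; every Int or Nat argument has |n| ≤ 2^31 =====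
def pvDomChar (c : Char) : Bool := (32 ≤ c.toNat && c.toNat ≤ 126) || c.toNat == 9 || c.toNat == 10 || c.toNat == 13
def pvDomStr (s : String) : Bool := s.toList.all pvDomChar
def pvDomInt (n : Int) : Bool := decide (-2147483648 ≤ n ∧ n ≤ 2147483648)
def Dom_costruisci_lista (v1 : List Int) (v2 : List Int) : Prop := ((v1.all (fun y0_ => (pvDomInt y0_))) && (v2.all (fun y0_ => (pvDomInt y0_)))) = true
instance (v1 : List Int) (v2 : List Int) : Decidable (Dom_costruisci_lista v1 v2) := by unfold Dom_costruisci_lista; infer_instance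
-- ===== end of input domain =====

-- B replaces A's per-index inner loops by one backward pass (suffix-product array + running suffix sum); proved to return the same list.

-- ===== PORT A =====
-- somma=0; for i in range(pos,len(v)): somma+=v[i]
def somma_celle (v : List Int) (pos : Int) : Int :=
  (PySem.List.pyRange pos (v.length : Int) 1).foldl
    (fun somma i => somma + PySem.List.pyGetD v i 0) 0

-- prodotto=1; for i in range(pos,len(v)): prodotto*=v[i]
def prodotto_celle (v : List Int) (pos : Int) : Int :=
  (PySem.List.pyRange pos (v.length : Int) 1).foldl
    (fun prodotto i => prodotto * PySem.List.pyGetD v i 0) 1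

def costruisci_lista (v1 : List Int) (v2 : List Int) : List Int :=
  (PySem.List.pyRange 0 (v1.length : Int) 1).foldl
    (fun v3 i =>
      if PySem.Int.mod i 2 = 0 then v3 ++ [somma_celle v1 (i + 1)]
      else if i = (v1.length : Int) - 1 then v3 ++ [0]
      else v3 ++ [prodotto_celle v2 (i + 1)]) []

-- ===== PORT B =====
-- prods = [1]*(m+1); for j in range(m-1,-1,-1): prods[j] = v2[j]*prods[j+1]
-- (backward fill: each cell is v2[j] times the cell to its right)
def pvProds (v2 : List Int) : List Int :=
  match v2 with
  | [] => [1]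
  | x :: xs => let r := pvProds xs; (x * r.headD 1) :: r

-- the backward i-loop: processes (i, v1[i]) pairs with i descending, carrying the
-- running suffix sum s and prepending each computed cell (out[i] = cell)
def pvLoopB (ps : List Int) (m n : Int) : List (Int × Int) → Int → List Int → List Int
  | [], _, acc => acc
  | (i, x) :: rest, s, acc =>
      let cell : Int :=
        if PySem.Int.mod i 2 = 0 then s
        else if i ≠ n - 1 then PySem.List.pyGetD ps (min (i + 1) m) 0
        else 0
      pvLoopB ps m n rest (s + x) (cell :: acc)

def costruisci_lista_alt (v1 : List Int) (v2 : List Int) : List Int :=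
  pvLoopB (pvProds v2) (v2.length : Int) (v1.length : Int)
    ((PySem.List.enumerate v1).reverse) 0 []

-- ===== PRECONDITION & SPEC =====
def Spec_costruisci_lista (v1 : List Int) (v2 : List Int) (out : List Int) : Prop := out = costruisci_lista_alt v1 v2
instance (v1 : List Int) (v2 : List Int) (out : List Int) : Decidable (Spec_costruisci_lista v1 v2 out) := by unfold Spec_costruisci_lista; infer_instance

-- ===== CLAIM (what is proved, stated in full; the proofs are below) =====
def Claim_equal_costruisci_lista : Prop := ∀ (v1 : List Int) (v2 : List Int), Dom_costruisci_lista v1 v2 → Spec_costruisci_lista v1 v2 (costruisci_lista v1 v2)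

-- ===== LEMMAS AND PROOFS =====

-- common specification: the j-th cell of the result
def pvCell (v1 v2 : List Int) (j : Nat) : Int :=
  if j % 2 = 0 then (v1.drop (j + 1)).sum
  else if j = v1.length - 1 then 0
  else (v2.drop (j + 1)).prod

def pvSpec (v1 v2 : List Int) : List Int :=
  (List.range v1.length).map (pvCell v1 v2)

lemma somma_celle_eq (v : List Int) (k : Nat) :
    somma_celle v (k : Int) = (v.drop k).sum := by
  unfold somma_celle
  rw [PySem.List.foldl_pyRange_pyGetD' v 0 (fun somma x => somma + x) 0 (a := (k : Int)) (by positivity)]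
  simp [List.sum_eq_foldl, Int.toNat_natCast]

lemma prodotto_celle_eq (v : List Int) (k : Nat) :
    prodotto_celle v (k : Int) = (v.drop k).prod := by
  unfold prodotto_celle
  rw [PySem.List.foldl_pyRange_pyGetD' v 0 (fun prodotto x => prodotto * x) 1 (a := (k : Int)) (by positivity)]
  simp [List.prod_eq_foldl, Int.toNat_natCast]

lemma portA_eq_spec (v1 v2 : List Int) :
    costruisci_lista v1 v2 = pvSpec v1 v2 := by
  unfold costruisci_lista pvSpec
  have hbody : (fun (v3 : List Int) (i : Int) =>
      if PySem.Int.mod i 2 = 0 then v3 ++ [somma_celle v1 (i + 1)]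
      else if i = (v1.length : Int) - 1 then v3 ++ [0]
      else v3 ++ [prodotto_celle v2 (i + 1)])
      = fun v3 i => v3 ++ [if PySem.Int.mod i 2 = 0 then somma_celle v1 (i + 1)
          else if i = (v1.length : Int) - 1 then 0 else prodotto_celle v2 (i + 1)] := by
    funext v3 i; split_ifs <;> rfl
  rw [hbody, PySem.List.foldl_append_singleton_eq_map, PySem.List.pyRange_zero_nat]
  rw [List.map_map]
  refine List.map_congr_left ?_
  intro j hj
  rw [List.mem_range] at hj
  simp only [Function.comp]
  have h1 : ((j : Int) + 1) = ((j + 1 : Nat) : Int) := by push_cast; ring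
  rw [h1, somma_celle_eq, prodotto_celle_eq]
  unfold pvCell
  have hmod : PySem.Int.mod (j : Int) 2 = ((j % 2 : Nat) : Int) := by
    exact_mod_cast PySem.Int.mod_natCast j 2
  have hlast : ((j : Int) = (v1.length : Int) - 1) ↔ (j = v1.length - 1) := by omega
  rw [hmod]
  simp only [hlast]
  by_cases hp : j % 2 = 0
  · simp [hp]
  · have hz : ¬ (((j % 2 : Nat) : Int) = 0) := by omega
    rw [if_neg hz, if_neg hp]

-- suffix products: pvProds v2 has length m+1 and cell k holds the product of v2[k:]
lemma pvProds_length (v : List Int) : (pvProds v).length = v.length + 1 := by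
  induction v with
  | nil => rfl
  | cons x xs ih => simp [pvProds, ih]

lemma pvProds_getD (v : List Int) (k : Nat) (hk : k ≤ v.length) :
    (pvProds v).getD k 0 = (v.drop k).prod := by
  induction v generalizing k with
  | nil =>
    have hk0 : k = 0 := Nat.le_zero.mp hk
    subst hk0; rfl
  | cons x xs ih =>
    cases k with
    | zero =>
      have hh : (pvProds xs).headD 1 = (pvProds xs).getD 0 0 := by
        cases h : pvProds xs with
        | nil => exact absurd (congrArg List.length h) (by simp [pvProds_length])
        | cons a t => simp
      have h0 : (pvProds xs).getD 0 0 = xs.prod := by simpa using ih 0 (Nat.zero_le _)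
      have hdef : (pvProds (x :: xs)).getD 0 0 = x * (pvProds xs).headD 1 := rfl
      rw [hdef, hh, h0]; simp
    | succ k' =>
      have : k' ≤ xs.length := by simpa using hk
      simpa [pvProds] using ih k' this

-- unrolling pvLoopB: the cells appear reversed in front of acc
def pvCells (ps : List Int) (m n : Int) : List (Int × Int) → Int → List Int
  | [], _ => []
  | (i, x) :: rest, s =>
      (if PySem.Int.mod i 2 = 0 then s
       else if i ≠ n - 1 then PySem.List.pyGetD ps (min (i + 1) m) 0
       else 0) :: pvCells ps m n rest (s + x)

lemma pvLoopB_eq_cells (ps : List Int) (m n : Int) (L : List (Int × Int)) :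
    ∀ s acc, pvLoopB ps m n L s acc = (pvCells ps m n L s).reverse ++ acc := by
  induction L with
  | nil => intro s acc; rfl
  | cons p rest ih =>
    intro s acc
    obtain ⟨i, x⟩ := p
    simp only [pvLoopB, pvCells, ih, List.reverse_cons, List.append_assoc, List.cons_append,
      List.nil_append]

-- the cell B computes at index j equals pvCell
lemma pvCellB_eq (v1 v2 : List Int) (j : Nat) (hj : j < v1.length) :
    (if PySem.Int.mod (j : Int) 2 = 0 then (v1.drop (j + 1)).sum
     else if (j : Int) ≠ (v1.length : Int) - 1 then
       PySem.List.pyGetD (pvProds v2) (min ((j : Int) + 1) (v2.length : Int)) 0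
     else 0) = pvCell v1 v2 j := by
  unfold pvCell
  have hmod : PySem.Int.mod (j : Int) 2 = ((j % 2 : Nat) : Int) := by
    exact_mod_cast PySem.Int.mod_natCast j 2
  rw [hmod]
  by_cases hp : j % 2 = 0
  · rw [if_pos (show ((j % 2 : Nat) : Int) = 0 by omega), if_pos hp]
  · rw [if_neg (show ¬ (((j % 2 : Nat) : Int) = 0) by omega), if_neg hp]
    by_cases hl : j = v1.length - 1
    · rw [if_neg (show ¬ ((j : Int) ≠ (v1.length : Int) - 1) by omega), if_pos hl]
    · rw [if_pos (show (j : Int) ≠ (v1.length : Int) - 1 by omega), if_neg hl]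
      -- pyGetD (pvProds v2) (min (j+1) m) 0 = (v2.drop (j+1)).prod
      have hkm : (min ((j : Int) + 1) (v2.length : Int)) = ((min (j + 1) v2.length : Nat) : Int) := by
        push_cast; omega
      rw [hkm, PySem.List.pyGetD_natCast]
      have hle : min (j + 1) v2.length ≤ v2.length := Nat.min_le_right _ _
      rw [pvProds_getD v2 _ hle]
      rcases Nat.le_total (j + 1) v2.length with h | h
      · rw [Nat.min_eq_left h]
      · rw [Nat.min_eq_right h]
        rw [List.drop_eq_nil_of_le h, List.drop_eq_nil_of_le (le_refl _)]

-- main induction: processing the reversed first k entries with s = sum v1[k:] yields the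
-- first k spec cells, reversed
lemma pvCells_take (v1 v2 : List Int) :
    ∀ k, k ≤ v1.length →
      pvCells (pvProds v2) (v2.length : Int) (v1.length : Int)
        (((PySem.List.enumerate v1).take k).reverse) ((v1.drop k).sum)
      = (((List.range k).map (pvCell v1 v2))).reverse := by
  intro k
  induction k with
  | zero => intro _; simp [pvCells]
  | succ k ih =>
    intro hk
    have hk' : k ≤ v1.length := Nat.le_of_succ_le hk
    have hklt : k < v1.length := hk
    have henum : (PySem.List.enumerate v1).take (k + 1)
        = (PySem.List.enumerate v1).take k ++ [(((k : Int)), v1[k])] := by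
      rw [List.take_add_one]
      congr 1
      rw [PySem.List.getElem?_enumerate, List.getElem?_eq_getElem hklt]
      simp
    have hdrop : v1.drop k = v1[k] :: v1.drop (k + 1) := List.drop_eq_getElem_cons hklt
    have hdropsum : (v1.drop k).sum = v1[k] + (v1.drop (k + 1)).sum := by
      rw [hdrop, List.sum_cons]
    rw [henum, List.reverse_append, List.reverse_singleton, List.singleton_append]
    simp only [pvCells]
    rw [List.range_succ, List.map_append, List.reverse_append,
      List.map_cons, List.map_nil, List.reverse_singleton, List.singleton_append]
    congr 1
    · exact pvCellB_eq v1 v2 k hklt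
    · rw [show (v1.drop (k+1)).sum + v1[k] = v1[k] + (v1.drop (k+1)).sum from by ring,
        ← hdropsum]
      exact ih hk'

lemma portB_eq_spec (v1 v2 : List Int) :
    costruisci_lista_alt v1 v2 = pvSpec v1 v2 := by
  unfold costruisci_lista_alt pvSpec
  rw [pvLoopB_eq_cells]
  have h := pvCells_take v1 v2 v1.length (le_refl _)
  rw [List.take_of_length_le (by rw [PySem.List.length_enumerate])] at h
  rw [List.drop_eq_nil_of_le (le_refl _)] at h
  simp only [List.sum_nil] at h
  rw [h, List.reverse_reverse, List.append_nil]

-- ===== VERDICT (by name: the statement is the Claim_ definition above) =====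
theorem costruisci_lista_spec : Claim_equal_costruisci_lista := by
  intro v1 v2 _
  unfold Spec_costruisci_lista
  rw [portA_eq_spec, portB_eq_spec]
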